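-- pv_equiv track=rewrite | github.com/ThomasSanna/109-python-problems-for-ccps | 23-count-growlers/23.py | count_growlers
-- ===== SOURCE A (Python) =====
-- def count_growlers(animals):
--     left = ["cat", "dog"]
--     dogs = ["dog", 'god']
--     res = 0
--     for i in range(len(animals)):
--         nbAll=0
--         nbDogs=0
--         n=i
--         isLeft = animals[i] in left
--         while n > 0 and n < len(animals)-1:
--             n = n-1 if isLeft else n+1
--             nbAll+=1
--             nbDogs+=1 if animals[n] in dogs else 0
--         res += 1 if nbDogs > nbAll/2 else 0
--     return res
-- ===== SOURCE B (Python) =====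
-- def count_growlers(animals):
--     dogs = ("dog", "god")
--     total = sum(a in dogs for a in animals)
--     n = len(animals)
--     res = 0
--     dleft = 0
--     for i, a in enumerate(animals):
--         cur = a in dogs
--         if a in ("cat", "dog"):
--             if 2 * dleft > i:
--                 res += 1
--         else:
--             if 2 * (total - dleft - cur) > n - 1 - i:
--                 res += 1
--         dleft += cur
--     return res
-- ===== Notes on version B (the rewrite author's own statement) =====
-- stated objective: faster
-- what changed: Replaced the per-animal inner while-scan (O(n^2)) by a single pass maintaining a running count of dogs to the left plus a precomputed total, answering each animal's range query in O(1).
-- intended difference: On lists of length >= 2 whose first animal faces right and sees more dogs than half among indices 1..n-1, or whose last animal faces left and sees more dogs than half among indices 0..n-2, A returns a count that omits those edge animals (its loop guard 'n > 0 and n < len-1' prevents the scan from ever starting at the edges), while B counts them; seeing every animal on the facing side is the intended behaviour. — e.g. on count_growlers(["god", "dog"]): A returns 0, B returns 2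
import Mathlib
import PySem

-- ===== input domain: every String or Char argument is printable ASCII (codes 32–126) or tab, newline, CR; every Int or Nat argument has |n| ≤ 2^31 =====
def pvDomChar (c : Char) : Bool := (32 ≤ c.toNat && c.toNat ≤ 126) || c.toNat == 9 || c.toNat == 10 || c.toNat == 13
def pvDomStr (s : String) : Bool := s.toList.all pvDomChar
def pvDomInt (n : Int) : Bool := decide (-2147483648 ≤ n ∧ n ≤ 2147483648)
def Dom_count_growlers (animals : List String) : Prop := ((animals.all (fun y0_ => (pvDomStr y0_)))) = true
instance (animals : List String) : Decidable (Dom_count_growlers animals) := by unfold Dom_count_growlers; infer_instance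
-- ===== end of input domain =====

-- B replaces A's per-animal inner while-scan (O(n^2)) by one pass with running dog counts (O(n));
-- B intentionally counts the edge animals (index 0 facing right, index n-1 facing left) that A's
-- loop guard accidentally skips — see D_count_growlers.

-- ===== PORT A =====
-- `animals[i] in ["cat","dog"]` / `in ["dog","god"]`
def pvIsLeft (a : String) : Bool := a == "cat" || a == "dog"
def pvIsDog (a : String) : Bool := a == "dog" || a == "god"

-- the inner `while n > 0 and n < len(animals)-1` loop; n stays in [0, len-1] so the
-- index `animals[n]` is always in range (getD's default is never used).
def growlWhile (animals : List String) (isLeft : Bool) (n nbAll nbDogs : Nat) : Nat × Nat :=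
  if h : 0 < n ∧ n < animals.length - 1 then
    let n' := if isLeft then n - 1 else n + 1
    growlWhile animals isLeft n' (nbAll + 1)
      (nbDogs + (if pvIsDog (animals.getD n' "") then 1 else 0))
  else (nbAll, nbDogs)
termination_by if isLeft then n else animals.length - n
decreasing_by cases isLeft <;> simp_all <;> omega

-- Python's `nbDogs > nbAll/2` (true division) is exact for these nonnegative ints
-- iff 2*nbDogs > nbAll, which is how it is written here.
def count_growlers (animals : List String) : Int :=
  (List.range animals.length).foldl (fun res i =>
    let isLeft := pvIsLeft (animals.getD i "")
    let p := growlWhile animals isLeft i 0 0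
    res + (if 2 * p.2 > p.1 then (1 : Int) else 0)) 0

-- ===== PORT B =====
-- the single `for i, a in enumerate(animals)` loop of Source B; i ≤ n-1 and dleft+cur ≤ total
-- throughout, so Python's `n - 1 - i` and `total - dleft - cur` match Nat subtraction.
def bLoop (total n : Nat) : Nat → Nat → Int → List String → Int
  | _, _, res, [] => res
  | i, dleft, res, a :: rest =>
    let cur : Nat := if pvIsDog a then 1 else 0
    let res' : Int :=
      if pvIsLeft a then (if 2 * dleft > i then res + 1 else res)
      else (if 2 * (total - dleft - cur) > n - 1 - i then res + 1 else res)
    bLoop total n (i + 1) (dleft + cur) res' rest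

def count_growlers_alt (animals : List String) : Int :=
  let total := animals.foldl (fun s a => s + (if pvIsDog a then 1 else 0)) 0
  bLoop total animals.length 0 0 0 animals

-- ===== PRECONDITION & SPEC =====
-- On lists of length ≥ 2 whose first animal faces right and sees more dogs than half among
-- indices 1..n-1, or whose last animal faces left and sees more dogs than half among indices
-- 0..n-2, A's guard `n > 0 and n < len-1` keeps the edge animal's scan from starting, so A
-- under-counts; B counts those edge animals, which is the intended behaviour.
-- 'more than half of the animals in l are dogs'
def seesDogs (l : List String) : Prop :=
  l.length < 2 * l.countP (fun a => decide (a = "dog" ∨ a = "god"))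

def D_count_growlers (animals : List String) : Prop :=
  2 ≤ animals.length ∧
  ((animals.getD 0 "" ∉ ["cat", "dog"] ∧ seesDogs (animals.drop 1)) ∨
   (animals.getD (animals.length - 1) "" ∈ ["cat", "dog"] ∧
      seesDogs (animals.take (animals.length - 1))))
instance (animals : List String) : Decidable (D_count_growlers animals) := by
  unfold D_count_growlers seesDogs; infer_instance

def Spec_count_growlers (animals : List String) (out : Int) : Prop :=
  ¬ D_count_growlers animals → out = count_growlers_alt animals
instance (animals : List String) (out : Int) : Decidable (Spec_count_growlers animals out) := by
  unfold Spec_count_growlers; infer_instance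

def pvDiffWitness_count_growlers : List String := ["god", "dog"]
def pvDiffWitnessOut_count_growlers : Int × Int := (0, 2)

-- ===== CLAIM (what is proved, stated in full; the proofs are below) =====
def Claim_unchanged_count_growlers : Prop := ∀ (animals : List String), Dom_count_growlers animals → Spec_count_growlers animals (count_growlers animals)
def Claim_changed_count_growlers : Prop := Dom_count_growlers (pvDiffWitness_count_growlers) ∧ D_count_growlers (pvDiffWitness_count_growlers) ∧ count_growlers (pvDiffWitness_count_growlers) = pvDiffWitnessOut_count_growlers.1 ∧ count_growlers_alt (pvDiffWitness_count_growlers) = pvDiffWitnessOut_count_growlers.2 ∧ pvDiffWitnessOut_count_growlers.1 ≠ pvDiffWitnessOut_count_growlers.2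
def Claim_exact_count_growlers : Prop := ∀ (animals : List String), Dom_count_growlers animals → D_count_growlers animals → count_growlers animals ≠ count_growlers_alt animals

-- ===== LEMMAS AND PROOFS =====

def dcnt (l : List String) : Nat := l.countP (fun a => pvIsDog a)

def fA (animals : List String) (i : Nat) : Int :=
  if pvIsLeft (animals.getD i "") then
    (if i < animals.length - 1 ∧ 2 * dcnt (animals.take i) > i then 1 else 0)
  else
    (if 0 < i ∧ 2 * dcnt (animals.drop (i + 1)) > animals.length - 1 - i then 1 else 0)

def fB (animals : List String) (i : Nat) : Int :=
  if pvIsLeft (animals.getD i "") then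
    (if 2 * dcnt (animals.take i) > i then 1 else 0)
  else
    (if 2 * dcnt (animals.drop (i + 1)) > animals.length - 1 - i then 1 else 0)

theorem dcnt_take_succ (animals : List String) (n : Nat) (h : n < animals.length) :
    dcnt (animals.take (n + 1)) = dcnt (animals.take n) + (if pvIsDog animals[n] then 1 else 0) := by
  simp only [dcnt]
  rw [← List.take_concat_get' animals n h, List.countP_append]
  simp

theorem dcnt_drop_succ (animals : List String) (n : Nat) (h : n < animals.length) :
    dcnt (animals.drop n) = (if pvIsDog animals[n] then 1 else 0) + dcnt (animals.drop (n + 1)) := by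
  simp only [dcnt]
  rw [List.drop_eq_getElem_cons h, List.countP_cons]
  simp [Nat.add_comm]

theorem getD_eq (animals : List String) (n : Nat) (h : n < animals.length) :
    animals.getD n "" = animals[n] := by
  simp [List.getD_eq_getElem?_getD, List.getElem?_eq_getElem h]

theorem W_left (animals : List String) :
    ∀ (n a d : Nat), n < animals.length - 1 →
      growlWhile animals true n a d = (a + n, d + dcnt (animals.take n)) := by
  intro n
  induction n with
  | zero =>
      intro a d _
      rw [growlWhile]
      simp [dcnt]
  | succ n ih =>
      intro a d h
      have hn : n < animals.length := by omega
      rw [growlWhile, dif_pos ⟨Nat.succ_pos n, h⟩]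
      simp only [if_true, Nat.add_sub_cancel]
      rw [ih _ _ (by omega), getD_eq animals n hn, dcnt_take_succ animals n hn,
        Prod.mk.injEq]
      constructor <;> omega

theorem W_right (animals : List String) :
    ∀ (k n a d : Nat), animals.length - n ≤ k → 0 < n →
      growlWhile animals false n a d =
        (a + (animals.length - 1 - n), d + dcnt (animals.drop (n + 1))) := by
  intro k
  induction k with
  | zero =>
      intro n a d hk hn
      rw [growlWhile, dif_neg (by omega), List.drop_eq_nil_of_le (by omega),
        Prod.mk.injEq]
      simp [dcnt]
      omega
  | succ k ih =>
      intro n a d hk hn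
      by_cases hc : n < animals.length - 1
      · rw [growlWhile, dif_pos ⟨hn, hc⟩]
        simp only [if_false, Bool.false_eq_true]
        have hn1 : n + 1 < animals.length := by omega
        rw [ih (n + 1) _ _ (by omega) (by omega), getD_eq animals (n + 1) hn1,
          dcnt_drop_succ animals (n + 1) hn1, Prod.mk.injEq]
        constructor <;> omega
      · rw [growlWhile, dif_neg (by omega), List.drop_eq_nil_of_le (by omega),
          Prod.mk.injEq]
        simp [dcnt]
        omega

theorem dcnt_decide (l : List String) :
    l.countP (fun a => decide (a = "dog" ∨ a = "god")) = dcnt l := by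
  unfold dcnt
  congr 1
  funext a
  by_cases h1 : a = "dog" <;> by_cases h2 : a = "god" <;> simp [pvIsDog, h1, h2]

theorem A_eq (animals : List String) :
    count_growlers animals = ((List.range animals.length).map (fA animals)).sum := by
  unfold count_growlers
  have step : (List.range animals.length).foldl (fun res i =>
      let isLeft := pvIsLeft (animals.getD i "")
      let p := growlWhile animals isLeft i 0 0
      res + (if 2 * p.2 > p.1 then (1 : Int) else 0)) 0
      = (List.range animals.length).foldl (fun res i => res + fA animals i) 0 := by
    apply PySem.List.foldl_congr_mem
    intro res i hi
    have hi' : i < animals.length := List.mem_range.mp hi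
    dsimp only
    congr 1
    by_cases hL : pvIsLeft (animals.getD i "") = true
    · have hLg : pvIsLeft (animals[i]?.getD "") = true := by
        rw [← List.getD_eq_getElem?_getD]; exact hL
      by_cases h1 : i < animals.length - 1
      · rw [hL, W_left animals i 0 0 h1]
        simp [fA, hLg, h1]
      · rw [hL, growlWhile, dif_neg (by omega)]
        simp [fA, hLg, h1]
    · have hL' : pvIsLeft (animals.getD i "") = false := by simpa using hL
      have hLg : pvIsLeft (animals[i]?.getD "") = false := by
        rw [← List.getD_eq_getElem?_getD]; exact hL'
      by_cases h0 : 0 < i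
      · rw [hL', W_right animals animals.length i 0 0 (by omega) h0]
        simp [fA, hLg, h0]
      · have hz : i = 0 := by omega
        subst hz
        rw [hL', growlWhile, dif_neg (by omega)]
        simp [fA, hLg, dcnt]
  rw [step, PySem.List.foldl_add]
  omega

theorem dcnt_split (animals : List String) (i : Nat) (h : i < animals.length) :
    dcnt animals = dcnt (animals.take i) + (if pvIsDog animals[i] then 1 else 0)
      + dcnt (animals.drop (i + 1)) := by
  have h1 : animals = animals.take i ++ animals.drop i := (List.take_append_drop i animals).symm
  unfold dcnt
  conv_lhs => rw [h1, List.countP_append, List.drop_eq_getElem_cons h, List.countP_cons]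
  omega

theorem total_eq (animals : List String) :
    animals.foldl (fun s a => s + (if pvIsDog a then 1 else 0)) 0 = dcnt animals := by
  suffices h : ∀ (l : List String) (s : Nat),
      l.foldl (fun s a => s + (if pvIsDog a then 1 else 0)) s = s + dcnt l by
    simpa using h animals 0
  intro l
  induction l with
  | nil => intro s; simp [dcnt]
  | cons x xs ih =>
      intro s
      rw [List.foldl_cons, ih]
      simp only [dcnt, List.countP_cons]
      omega

theorem bLoop_spec (animals : List String) :
    ∀ (k i : Nat) (res : Int), animals.length - i ≤ k → i ≤ animals.length →
      bLoop (dcnt animals) animals.length i (dcnt (animals.take i)) res (animals.drop i) =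
        res + ((List.range' i (animals.length - i)).map (fB animals)).sum := by
  intro k
  induction k with
  | zero =>
      intro i res hk hi
      have hlen : i = animals.length := by omega
      subst hlen
      simp [bLoop, List.drop_length]
  | succ k ih =>
      intro i res hk hi
      rcases Nat.lt_or_ge i animals.length with hlt | hge
      · rw [List.drop_eq_getElem_cons hlt]
        simp only [bLoop]
        have hsplit := dcnt_split animals i hlt
        have hdl : dcnt (List.take i animals) + (if pvIsDog animals[i] then 1 else 0)
            = dcnt (List.take (i + 1) animals) := (dcnt_take_succ animals i hlt).symm
        rw [hdl, ih (i + 1) _ (by omega) (by omega)]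
        have hrr : animals.length - i = (animals.length - (i + 1)) + 1 := by omega
        rw [hrr, List.range'_succ, List.map_cons, List.sum_cons]
        have hdrop : dcnt animals - dcnt (List.take i animals)
            - (if pvIsDog animals[i] then 1 else 0) = dcnt (List.drop (i + 1) animals) := by
          omega
        have hres : (if pvIsLeft animals[i] = true then
              (if 2 * dcnt (List.take i animals) > i then res + 1 else res)
            else
              (if 2 * (dcnt animals - dcnt (List.take i animals)
                  - (if pvIsDog animals[i] then 1 else 0)) > animals.length - 1 - i then
                res + 1 else res)) = res + fB animals i := by
          rw [hdrop]
          unfold fB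
          rw [getD_eq animals i hlt]
          split_ifs <;> omega
        rw [hres]
        ring
      · have hlen : i = animals.length := by omega
        subst hlen
        simp [bLoop, List.drop_length]

theorem B_eq (animals : List String) :
    count_growlers_alt animals = ((List.range animals.length).map (fB animals)).sum := by
  unfold count_growlers_alt
  dsimp only
  rw [total_eq]
  have h := bLoop_spec animals animals.length 0 0 (by omega) (by omega)
  simpa [List.range_eq_range', dcnt] using h

theorem fA_le_fB (animals : List String) (i : Nat) : fA animals i ≤ fB animals i := by
  unfold fA fB
  split_ifs <;> omega

theorem pointwise (animals : List String) (h : ¬ D_count_growlers animals) :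
    ∀ i, i < animals.length → fA animals i = fB animals i := by
  intro i hi
  unfold fA fB
  by_cases hL : pvIsLeft (animals.getD i "") = true
  · rw [if_pos hL, if_pos hL]
    split_ifs with h1 h2 h3
    · rfl
    · exact absurd h1.2 h2
    · exfalso
      apply h
      have htz : dcnt (animals.take 0) = 0 := rfl
      have hpos : 0 < i := by
        by_contra h0
        have hz : i = 0 := by omega
        rw [hz] at h3
        omega
      have hieq : i = animals.length - 1 := by omega
      subst hieq
      refine ⟨by omega, Or.inr ⟨?_, ?_⟩⟩
      · simp only [pvIsLeft, Bool.or_eq_true, beq_iff_eq] at hL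
        simpa using hL
      · unfold seesDogs
        rw [dcnt_decide, List.length_take]
        omega
    · rfl
  · rw [if_neg hL, if_neg hL]
    split_ifs with h1 h2 h3
    · rfl
    · exact absurd h1.2 h2
    · exfalso
      apply h
      have hiz : i = 0 := by omega
      subst hiz
      have hlen : 2 ≤ animals.length := by
        by_contra hlen
        have hdz : animals.drop (0 + 1) = [] := List.drop_eq_nil_of_le (by omega)
        rw [hdz] at h3
        have hn : dcnt ([] : List String) = 0 := rfl
        omega
      refine ⟨hlen, Or.inl ⟨?_, ?_⟩⟩
      · have hLf : pvIsLeft (animals.getD 0 "") = false := by simpa using hL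
        simp only [pvIsLeft, Bool.or_eq_false_iff, beq_eq_false_iff_ne, ne_eq] at hLf
        simpa using not_or.mpr hLf
      · unfold seesDogs
        rw [dcnt_decide, List.length_drop]
        omega
    · rfl

theorem sum_lt (f g : Nat → Int) :
    ∀ (l : List Nat), (∀ i ∈ l, f i ≤ g i) → (∃ i ∈ l, f i < g i) →
      (l.map f).sum < (l.map g).sum := by
  intro l
  induction l with
  | nil =>
      rintro _ ⟨i, hi, _⟩
      exact absurd hi (by simp)
  | cons x xs ih =>
      rintro hle ⟨i, hi, hlt⟩
      rw [List.map_cons, List.map_cons, List.sum_cons, List.sum_cons]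
      rcases List.mem_cons.mp hi with rfl | hi'
      · exact add_lt_add_of_lt_of_le hlt
          (List.sum_le_sum (fun j hj => hle j (List.mem_cons_of_mem _ hj)))
      · exact add_lt_add_of_le_of_lt (hle x List.mem_cons_self)
          (ih (fun j hj => hle j (List.mem_cons_of_mem _ hj)) ⟨i, hi', hlt⟩)

-- ===== VERDICT (by name: the statement is the Claim_ definition above) =====
theorem count_growlers_spec : Claim_unchanged_count_growlers := by
  intro animals _ hD
  rw [A_eq, B_eq]
  exact congrArg List.sum (List.map_congr_left (fun i hi => pointwise animals hD i (List.mem_range.mp hi)))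

theorem count_growlers_changed : Claim_changed_count_growlers := by
  unfold Claim_changed_count_growlers
  refine ⟨by decide, by decide, ?_, by decide, by decide⟩
  rw [A_eq]; decide

theorem count_growlers_tight : Claim_exact_count_growlers := by
  intro animals _ hD
  rw [A_eq, B_eq]
  apply ne_of_lt
  apply sum_lt
  · intro i _
    exact fA_le_fB animals i
  rcases hD with ⟨h2, ⟨hR, hC⟩ | ⟨hLst, hC⟩⟩
  · refine ⟨0, List.mem_range.mpr (by omega), ?_⟩
    unfold fA fB
    have hR' : ¬(animals.getD 0 "" = "cat" ∨ animals.getD 0 "" = "dog") := by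
      simpa using hR
    have hL : pvIsLeft (animals.getD 0 "") = false := by
      rcases not_or.mp hR' with ⟨ha, hb⟩
      simp only [pvIsLeft, Bool.or_eq_false_iff, beq_eq_false_iff_ne, ne_eq]
      exact ⟨ha, hb⟩
    have hLn : ¬ pvIsLeft (animals.getD 0 "") = true := by rw [hL]; decide
    rw [if_neg hLn, if_neg hLn]
    simp only [Nat.zero_add, Nat.sub_zero]
    unfold seesDogs at hC
    rw [dcnt_decide, List.length_drop] at hC
    split_ifs <;> omega
  · refine ⟨animals.length - 1, List.mem_range.mpr (by omega), ?_⟩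
    unfold fA fB
    have hLst' : animals.getD (animals.length - 1) "" = "cat" ∨
        animals.getD (animals.length - 1) "" = "dog" := by simpa using hLst
    have hL : pvIsLeft (animals.getD (animals.length - 1) "") = true := by
      unfold pvIsLeft
      rcases hLst' with ha | hb
      · rw [ha]; decide
      · rw [hb]; decide
    rw [if_pos hL, if_pos hL]
    unfold seesDogs at hC
    rw [dcnt_decide, List.length_take] at hC
    split_ifs <;> omega
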